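-- pv_equiv track=rewrite | github.com/permCoding/ege-24-25 | tasks/19/19251.py | f
-- ===== SOURCE A (Python) =====
-- def f(s, step):
--     if s >= 132: return step%2 == 0
--     if step == 0: return False
--     step -= 1
--     t = [
--             f(s+3, step),
--             f(s+6, step),
--             f(s*3, step)
--         ]
--     if step%2 != 0:
--         #return any(t)  # 19
--         return all(t)
--     else:
--         return any(t)
-- ===== SOURCE B (Python) =====
-- def f(s, step):
--     # Memoized top-down recursion on (s, step): each game state is evaluated once.
--     memo = {}
--     def go(s, step):
--         if s >= 132:
--             return step % 2 == 0
--         if step == 0: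
--             return False
--         key = (s, step)
--         if key in memo:
--             return memo[key]
--         st = step - 1
--         r1 = go(s + 3, st)
--         r2 = go(s + 6, st)
--         r3 = go(s * 3, st)
--         r = (r1 and r2 and r3) if st % 2 != 0 else (r1 or r2 or r3)
--         memo[key] = r
--         return r
--     return go(s, step)
-- ===== Notes on version B (the rewrite author's own statement) =====
-- stated objective: faster
-- what changed: B replaces A's naive triple-branching recursion (each game state re-evaluated exponentially often) by memoized recursion on the state (s, step), so every state is evaluated once.
-- outside the precondition, e.g. on f(131, -1): A returns True, B returns True; on f(1, -1): A does not finish within the time limit, B returns True; on f(0, 950): A does not finish within the time limit, B returns False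
import Mathlib
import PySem

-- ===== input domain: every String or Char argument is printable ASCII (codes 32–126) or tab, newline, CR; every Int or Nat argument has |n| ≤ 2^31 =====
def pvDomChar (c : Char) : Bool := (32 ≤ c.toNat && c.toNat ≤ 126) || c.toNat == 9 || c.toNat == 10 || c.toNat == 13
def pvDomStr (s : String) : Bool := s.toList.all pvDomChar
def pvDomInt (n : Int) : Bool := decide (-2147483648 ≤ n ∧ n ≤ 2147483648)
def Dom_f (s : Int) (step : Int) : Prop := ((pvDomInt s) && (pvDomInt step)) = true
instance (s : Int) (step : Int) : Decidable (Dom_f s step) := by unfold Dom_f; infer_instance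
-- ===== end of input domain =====

-- B memoizes the game recursion on the state (s, step) so each state is evaluated once
-- instead of A's exponential re-evaluation; equivalence is proved on Pre_f below.


-- ===== PORT A =====
-- Literal port of A; the Nat fuel only makes the recursion total (none = fuel ran out;
-- inside Pre_f the fuel step.toNat + 132 is proved sufficient).
def fA : Nat → Int → Int → Option Bool
  | 0, _, _ => none
  | n+1, s, step =>
    if 132 ≤ s then some (PySem.Int.mod step 2 == 0)
    else if step == 0 then some false
    else
      match fA n (s+3) (step-1), fA n (s+6) (step-1), fA n (s*3) (step-1) with
      | some t1, some t2, some t3 =>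
        if PySem.Int.mod (step-1) 2 != 0 then some (t1 && t2 && t3)
        else some (t1 || t2 || t3)
      | _, _, _ => none

def f (s : Int) (step : Int) : Bool := (fA (step.toNat + 132) s step).getD false

-- ===== PORT B =====
-- Literal port of B (Source B): memoized recursion threading the memo dict; same fuel guard.
def fB : Nat → PySem.Dict (Int × Int) Bool → Int → Int →
    Option (Bool × PySem.Dict (Int × Int) Bool)
  | 0, _, _, _ => none
  | n+1, memo, s, step =>
    if 132 ≤ s then some (PySem.Int.mod step 2 == 0, memo)
    else if step == 0 then some (false, memo)
    else
      match memo.get? (s, step) with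
      | some b => some (b, memo)
      | none =>
        match fB n memo (s+3) (step-1) with
        | none => none
        | some (r1, m1) =>
          match fB n m1 (s+6) (step-1) with
          | none => none
          | some (r2, m2) =>
            match fB n m2 (s*3) (step-1) with
            | none => none
            | some (r3, m3) =>
              let r := if PySem.Int.mod (step-1) 2 != 0 then r1 && r2 && r3
                       else r1 || r2 || r3
              some (r, m3.insert (s, step) r)

def f_alt (s : Int) (step : Int) : Bool :=
  ((fB (step.toNat + 132) PySem.Dict.empty s step).map Prod.fst).getD false

-- ===== PRECONDITION & SPEC =====
-- Pre_f excludes (a) step < 0 with s < 132, where A's recursion must climb to 132 through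
-- ~3^((132-s)/3) calls (for s ≤ 0 it never terminates, and below s ≈ 110 it never finishes
-- in practice), and (b) s ≤ 0 with step ≥ 900, where A's recursion depth equals step and
-- hits Python's recursion limit (RecursionError) or its 3^step call tree never finishes.
def Pre_f (s : Int) (step : Int) : Prop :=
  132 ≤ s ∨ (0 ≤ step ∧ (1 ≤ s ∨ step < 900))
instance (s : Int) (step : Int) : Decidable (Pre_f s step) := by unfold Pre_f; infer_instance
def pvWitness_f : Int × Int := (0, 6)
def Spec_f (s : Int) (step : Int) (out : Bool) : Prop := out = f_alt s step
instance (s : Int) (step : Int) (out : Bool) : Decidable (Spec_f s step out) := by unfold Spec_f; infer_instance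

-- ===== CLAIM (what is proved, stated in full; the proofs are below) =====
def Claim_equal_f : Prop := ∀ (s : Int) (step : Int), Dom_f s step → Pre_f s step → Spec_f s step (f s step)

-- ===== LEMMAS AND PROOFS =====

-- more fuel never changes a successful run of fA
theorem fA_mono : ∀ (n : Nat) (s t : Int) (r : Bool),
    fA n s t = some r → fA (n+1) s t = some r := by
  intro n
  induction n with
  | zero => intro s t r h; simp [fA] at h
  | succ n ih =>
    intro s t r h
    rw [fA] at h
    rw [fA]
    by_cases h1 : 132 ≤ s
    · simp only [if_pos h1] at h ⊢; exact h
    · by_cases h2 : (t == 0) = true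
      · simp only [if_neg h1, if_pos h2] at h ⊢; exact h
      · simp only [if_neg h1, if_neg h2] at h ⊢
        rcases hA : fA n (s+3) (t-1) with _ | rA
        · simp only [hA] at h; exact absurd h (by simp)
        rcases hB : fA n (s+6) (t-1) with _ | rB
        · simp only [hA, hB] at h; exact absurd h (by simp)
        rcases hC : fA n (s*3) (t-1) with _ | rC
        · simp only [hA, hB, hC] at h; exact absurd h (by simp)
        rw [ih _ _ _ hA, ih _ _ _ hB, ih _ _ _ hC]
        simpa only [hA, hB, hC] using h

theorem fA_le {n m : Nat} (hnm : n ≤ m) {s t : Int} {r : Bool}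
    (h : fA n s t = some r) : fA m s t = some r := by
  induction hnm with
  | refl => exact h
  | step _ ih => exact fA_mono _ _ _ _ ih

theorem fA_det {n m : Nat} {s t : Int} {r r' : Bool}
    (h : fA n s t = some r) (h' : fA m s t = some r') : r = r' := by
  have h1 := fA_le (Nat.le_max_left n m) h
  have h2 := fA_le (Nat.le_max_right n m) h'
  rw [h1] at h2; exact Option.some.inj h2

-- the fuel n is sufficient whenever step is a nonnegative number below n,
-- or s ≥ 1 and n leaves room to climb from s to 132 in steps of at least 2
theorem fA_suff : ∀ (n : Nat) (s t : Int),
    ((0 ≤ t ∧ t < (n : Int)) ∨ (1 ≤ s ∧ 132 ≤ s + 2*(n : Int) - 2 ∧ 1 ≤ n)) →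
    (fA n s t).isSome := by
  intro n
  induction n with
  | zero =>
    intro s t h
    exfalso
    rcases h with ⟨h1, h2⟩ | ⟨_, _, h3⟩
    · push_cast at h2; omega
    · omega
  | succ n ih =>
    intro s t h
    rw [fA]
    by_cases h1 : 132 ≤ s
    · simp [h1]
    · by_cases h2 : (t == 0) = true
      · simp [h1, h2]
      · simp only [if_neg h1, if_neg h2]
        have ht0 : t ≠ 0 := by simpa using h2
        have hA : (fA n (s+3) (t-1)).isSome := by
          apply ih; push_cast at h ⊢; omega
        have hB : (fA n (s+6) (t-1)).isSome := by
          apply ih; push_cast at h ⊢; omega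
        have hC : (fA n (s*3) (t-1)).isSome := by
          apply ih; push_cast at h ⊢; omega
        rcases Option.isSome_iff_exists.mp hA with ⟨rA, hA'⟩
        rcases Option.isSome_iff_exists.mp hB with ⟨rB, hB'⟩
        rcases Option.isSome_iff_exists.mp hC with ⟨rC, hC'⟩
        simp only [hA', hB', hC']
        split <;> simp

-- the memo invariant: every stored value is a true fA value for its key
def Good (d : PySem.Dict (Int × Int) Bool) : Prop :=
  ∀ (p : Int × Int) (b : Bool), d.get? p = some b → ∃ k, fA k p.1 p.2 = some b

theorem good_empty : Good PySem.Dict.empty := by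
  intro p b h
  simp [PySem.Dict.get?_empty] at h

-- whenever the naive recursion succeeds, the memoized one returns the same value
-- from any Good memo, and leaves a Good memo behind
theorem fB_correct : ∀ (n : Nat) (memo : PySem.Dict (Int × Int) Bool) (s t : Int) (r : Bool),
    Good memo → fA n s t = some r →
    ∃ m', fB n memo s t = some (r, m') ∧ Good m' := by
  intro n
  induction n with
  | zero => intro memo s t r _ h; simp [fA] at h
  | succ n ih =>
    intro memo s t r hG h
    have h0 := h
    rw [fA] at h
    rw [fB]
    by_cases h1 : 132 ≤ s
    · simp only [if_pos h1] at h ⊢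
      exact ⟨memo, by rw [Option.some.inj h], hG⟩
    · by_cases h2 : (t == 0) = true
      · simp only [if_neg h1, if_pos h2] at h ⊢
        exact ⟨memo, by rw [Option.some.inj h], hG⟩
      · simp only [if_neg h1, if_neg h2] at h ⊢
        rcases hm : memo.get? (s, t) with _ | b
        · -- memo miss: compute the three children, then store the result
          rcases hA : fA n (s+3) (t-1) with _ | rA
          · simp only [hA] at h; exact absurd h (by simp)
          rcases hB : fA n (s+6) (t-1) with _ | rB
          · simp only [hA, hB] at h; exact absurd h (by simp)
          rcases hC : fA n (s*3) (t-1) with _ | rC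
          · simp only [hA, hB, hC] at h; exact absurd h (by simp)
          simp only [hA, hB, hC] at h
          obtain ⟨m1, e1, g1⟩ := ih memo (s+3) (t-1) rA hG hA
          obtain ⟨m2, e2, g2⟩ := ih m1 (s+6) (t-1) rB g1 hB
          obtain ⟨m3, e3, g3⟩ := ih m2 (s*3) (t-1) rC g2 hC
          have hr : (if (PySem.Int.mod (t-1) 2 != 0) = true then rA && rB && rC
                     else rA || rB || rC) = r := by
            split at h <;> simp_all
          refine ⟨m3.insert (s, t) r, ?_, ?_⟩
          · simp only [e1, e2, e3, hr]
          · intro p b hpb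
            rcases eq_or_ne p (s, t) with hp | hp
            · subst hp
              rw [PySem.Dict.get?_insert_self] at hpb
              have hb : b = r := (Option.some.inj hpb).symm
              subst hb
              exact ⟨n+1, h0⟩
            · rw [PySem.Dict.get?_insert_of_ne _ _ hp] at hpb
              exact g3 p b hpb
        · -- memo hit: the stored value is r by determinism of fA
          obtain ⟨k, hk⟩ := hG (s, t) b hm
          have hb : b = r := fA_det hk h0
          exact ⟨memo, by rw [hb], hG⟩

-- ===== VERDICT (by name: the statement is the Claim_ definition above) =====
theorem f_spec : Claim_equal_f := by
  intro s t _ hPre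
  unfold Spec_f f f_alt
  have hsome : (fA (t.toNat + 132) s t).isSome := by
    apply fA_suff
    rcases hPre with h | ⟨h0, _⟩
    · right; omega
    · left; omega
  rcases Option.isSome_iff_exists.mp hsome with ⟨r, hr⟩
  rcases fB_correct _ _ _ _ _ good_empty hr with ⟨m', hm', _⟩
  rw [hr, hm']
  rfl
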